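-- pv_equiv track=rewrite | github.com/linshaoyong/leetcode | python/array/1030_matrix_cells_in_distance_order.py | allCellsDistOrder
-- ===== SOURCE A (Python) =====
-- def allCellsDistOrder(R, C, r0, c0):
--     """
--     :type R: int
--     :type C: int
--     :type r0: int
--     :type c0: int
--     :rtype: List[List[int]]
--     """
--     hm = {}
--     for i in range(R):
--         for j in range(C):
--             distance = abs(i - r0) + abs(j - c0)
--             v = hm.get(distance, [])
--             v.append([i, j])
--             hm[distance] = v
--     res = []
--     for k in sorted(hm):
--         res.extend(hm[k])
--     return res
-- ===== SOURCE B (Python) =====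
-- def allCellsDistOrder(R, C, r0, c0):
--     cells = [[i, j] for i in range(R) for j in range(C)]
--     return sorted(cells, key=lambda c: abs(c[0] - r0) + abs(c[1] - c0))
-- ===== Notes on version B (the rewrite author's own statement) =====
-- stated objective: idiomatic
-- what changed: Replaces A's distance-bucketing dict plus sort-keys-and-concatenate with a flat comprehension and one stable sort keyed on Manhattan distance (ties keep row-major order by sort stability).
import Mathlib
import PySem

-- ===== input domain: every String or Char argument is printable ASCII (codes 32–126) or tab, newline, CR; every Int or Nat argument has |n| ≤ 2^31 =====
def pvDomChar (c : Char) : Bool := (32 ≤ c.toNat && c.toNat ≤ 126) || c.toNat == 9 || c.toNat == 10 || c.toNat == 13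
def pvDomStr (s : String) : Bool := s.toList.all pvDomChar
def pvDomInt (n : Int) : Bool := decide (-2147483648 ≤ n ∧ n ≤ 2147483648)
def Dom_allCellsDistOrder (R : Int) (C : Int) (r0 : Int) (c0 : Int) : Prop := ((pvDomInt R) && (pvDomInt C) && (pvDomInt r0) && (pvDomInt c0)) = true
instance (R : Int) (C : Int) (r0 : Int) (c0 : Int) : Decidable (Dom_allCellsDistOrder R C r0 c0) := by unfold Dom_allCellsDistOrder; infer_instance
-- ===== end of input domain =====

-- B replaces A's distance-bucketing dict + key-sort-and-concatenate by a flat cell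
-- comprehension and ONE stable sort keyed on Manhattan distance (idiomatic rewrite).

-- ===== PORT A =====
def allCellsDistOrder (R : Int) (C : Int) (r0 : Int) (c0 : Int) : List (List Int) :=
  let hm : PySem.Dict Int (List (List Int)) :=
    (PySem.List.pyRange 0 R 1).foldl (fun hm i =>
      (PySem.List.pyRange 0 C 1).foldl (fun hm j =>
        -- v = hm.get(distance, []); v.append([i, j]); hm[distance] = v  ≡  Dict.modify
        hm.modify (|i - r0| + |j - c0|) [] (fun v => v ++ [[i, j]])) hm) PySem.Dict.empty
  -- for k in sorted(hm): res.extend(hm[k])   (k is always a key of hm, so hm[k] = getD k [])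
  (PySem.List.sorted hm.keys (fun k => k) false).foldl (fun res k => res ++ hm.getD k []) []

-- ===== PORT B =====
def allCellsDistOrder_alt (R : Int) (C : Int) (r0 : Int) (c0 : Int) : List (List Int) :=
  let cells := (PySem.List.pyRange 0 R 1).flatMap (fun i =>
    (PySem.List.pyRange 0 C 1).map (fun j => [i, j]))
  PySem.List.sorted cells
    (fun c => |PySem.List.pyGetD c 0 0 - r0| + |PySem.List.pyGetD c 1 0 - c0|) false

-- ===== PRECONDITION & SPEC =====
def Spec_allCellsDistOrder (R : Int) (C : Int) (r0 : Int) (c0 : Int) (out : List (List Int)) : Prop := out = allCellsDistOrder_alt R C r0 c0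
instance (R : Int) (C : Int) (r0 : Int) (c0 : Int) (out : List (List Int)) : Decidable (Spec_allCellsDistOrder R C r0 c0 out) := by unfold Spec_allCellsDistOrder; infer_instance

-- ===== CLAIM (what is proved, stated in full; the proofs are below) =====
def Claim_equal_allCellsDistOrder : Prop := ∀ (R : Int) (C : Int) (r0 : Int) (c0 : Int), Dom_allCellsDistOrder R C r0 c0 → Spec_allCellsDistOrder R C r0 c0 (allCellsDistOrder R C r0 c0)

-- ===== LEMMAS AND PROOFS =====

-- B's sort key and cell list, named for the proofs.
def pvCells (R C : Int) : List (List Int) :=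
  (PySem.List.pyRange 0 R 1).flatMap (fun i => (PySem.List.pyRange 0 C 1).map (fun j => [i, j]))

def pvKey (r0 c0 : Int) (c : List Int) : Int :=
  |PySem.List.pyGetD c 0 0 - r0| + |PySem.List.pyGetD c 1 0 - c0|

-- Stability of insertBy: filtering one key-class commutes with one stable insertion.
theorem pv_filter_insertBy {α : Type} (key : α → Int) (x : α) (ys : List α) (d : Int)
    (h : ys.Pairwise (fun a b => key a ≤ key b)) :
    (PySem.List.insertBy (fun a b => decide (key a < key b)) x ys).filter (fun c => key c == d)
      = ys.filter (fun c => key c == d) ++ (if key x == d then [x] else []) := by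
  induction ys with
  | nil =>
    by_cases hb : key x = d <;> simp [PySem.List.insertBy, hb]
  | cons y ys ih =>
    rw [List.pairwise_cons] at h
    by_cases hlt : key x < key y
    · simp only [PySem.List.insertBy, hlt, decide_true, if_true]
      by_cases hd : key x = d
      · have hnil : (y :: ys).filter (fun c => key c == d) = [] := by
          apply List.filter_eq_nil_iff.mpr
          intro c hc
          rcases List.mem_cons.mp hc with rfl | hc
          · simp only [beq_iff_eq]; omega
          · have := h.1 c hc; simp only [beq_iff_eq]; omega
        rw [List.filter_cons, hnil]
        simp [hd]
      · rw [List.filter_cons]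
        simp [hd]
    · simp only [PySem.List.insertBy, hlt, decide_false, Bool.false_eq_true, if_false]
      rw [List.filter_cons, ih h.2]
      by_cases hy : key y = d <;> simp [hy]

-- Stability of sorted: filtering one key-class commutes with the stable sort.
theorem pv_filter_sorted {α : Type} (key : α → Int) (xs : List α) (d : Int) :
    (PySem.List.sorted xs key false).filter (fun c => key c == d)
      = xs.filter (fun c => key c == d) := by
  induction xs using List.reverseRecOn with
  | nil => simp [PySem.List.sorted]
  | append_singleton xs x ih =>
    have hs : PySem.List.sorted (xs ++ [x]) key false
        = PySem.List.insertBy (fun a b => decide (key a < key b)) x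
            (PySem.List.sorted xs key false) := by
      rw [PySem.List.sorted_eq_foldl_insertBy, PySem.List.sorted_eq_foldl_insertBy,
        List.foldl_append]
      rfl
    rw [hs, pv_filter_insertBy key x _ d (PySem.List.sorted_pairwise xs key),
      ih, List.filter_append]
    by_cases hb : key x = d <;> simp [hb]

-- A concatenation of constant-key blocks along strictly increasing keys is key-sorted.
theorem pv_pairwise_flatMap {α : Type} (key : α → Int) (ds : List Int) (f : Int → List α)
    (hds : ds.Pairwise (· < ·)) (hf : ∀ d, ∀ c ∈ f d, key c = d) :
    (ds.flatMap f).Pairwise (fun a b => key a ≤ key b) := by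
  induction ds with
  | nil => simp
  | cons d ds ih =>
    rw [List.pairwise_cons] at hds
    rw [List.flatMap_cons, List.pairwise_append]
    refine ⟨?_, ih hds.2, ?_⟩
    · apply List.pairwise_of_forall_mem_list
      intro a ha b hb
      rw [hf d a ha, hf d b hb]
    · intro a ha b hb
      rcases List.mem_flatMap.mp hb with ⟨d', hd', hb'⟩
      have := hds.1 d' hd'
      rw [hf d a ha, hf d' b hb']
      omega

theorem pv_flatMap_ite {α : Type} (ds : List Int) (d0 : Int) (X : List α) (hnd : ds.Nodup) :
    ds.flatMap (fun d => if d == d0 then X else []) = if d0 ∈ ds then X else [] := by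
  induction ds with
  | nil => simp
  | cons d ds ih =>
    rw [List.nodup_cons] at hnd
    rw [List.flatMap_cons, ih hnd.2]
    by_cases hd : d = d0
    · subst hd
      simp [hnd.1]
    · simp [hd, Ne.symm hd]

-- Two key-sorted lists with identical key-classes are equal.
theorem pv_eq_of_pairwise_of_filter_eq {α : Type} (key : α → Int) (ys zs : List α)
    (hy : ys.Pairwise (fun a b => key a ≤ key b)) (hz : zs.Pairwise (fun a b => key a ≤ key b))
    (hf : ∀ d, ys.filter (fun c => key c == d) = zs.filter (fun c => key c == d)) :
    ys = zs := by
  induction ys generalizing zs with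
  | nil =>
    cases zs with
    | nil => rfl
    | cons z zs =>
      have := hf (key z)
      simp at this
  | cons y ys ih =>
    cases zs with
    | nil =>
      have := hf (key y)
      simp at this
    | cons z zs =>
      rw [List.pairwise_cons] at hy hz
      have hyz : key y = key z := by
        have h1 : key z ≤ key y := by
          have h := hf (key y)
          rw [List.filter_cons, List.filter_cons] at h
          simp only [beq_self_eq_true, if_true] at h
          by_cases hzk : key z = key y
          · omega
          · have hne : (key z == key y) = false := by simp [hzk]
            rw [hne] at h
            simp only [Bool.false_eq_true, if_false] at h
            have hmem : y ∈ zs.filter (fun c => key c == key y) := by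
              rw [← h]; exact List.mem_cons_self ..
            have := hz.1 y (List.mem_of_mem_filter hmem)
            omega
        have h2 : key y ≤ key z := by
          have h := hf (key z)
          rw [List.filter_cons, List.filter_cons] at h
          simp only [beq_self_eq_true, if_true] at h
          by_cases hyk : key y = key z
          · omega
          · have hne : (key y == key z) = false := by simp [hyk]
            rw [hne] at h
            simp only [Bool.false_eq_true, if_false] at h
            have hmem : z ∈ ys.filter (fun c => key c == key z) := by
              rw [h]; exact List.mem_cons_self ..
            have := hy.1 z (List.mem_of_mem_filter hmem)
            omega
        omega
      have hhd := hf (key y)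
      rw [List.filter_cons, List.filter_cons] at hhd
      have e1 : (key y == key y) = true := by simp
      have e2 : (key z == key y) = true := by simp [hyz]
      rw [e1, e2] at hhd
      simp only [if_true] at hhd
      obtain ⟨rfl, htl⟩ := List.cons.inj hhd
      congr 1
      apply ih zs hy.2 hz.2
      intro d
      by_cases hd : key y = d
      · rw [← hd]; exact htl
      · have h := hf d
        rw [List.filter_cons, List.filter_cons] at h
        have h1 : (key y == d) = false := by simp [hd]
        rw [h1] at h
        simpa using h

-- The stable sort IS the bucket concatenation over sorted distinct keys.
theorem pv_stable_sort_eq_buckets {α : Type} (key : α → Int) (cells : List α) :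
    PySem.List.sorted cells key false
      = (PySem.List.sorted (PySem.Set.ofList (cells.map key)) (fun k => k) false).flatMap
          (fun d => cells.filter (fun c => key c == d)) := by
  set ds := PySem.List.sorted (PySem.Set.ofList (cells.map key)) (fun k => k) false with hds_def
  have hnd : ds.Nodup :=
    ((PySem.List.sorted_perm _ _ _).nodup_iff).mpr (PySem.Set.nodup_ofList _)
  have hmem : ∀ d, d ∈ ds ↔ d ∈ cells.map key := by
    intro d
    rw [hds_def, PySem.List.mem_sorted, PySem.Set.mem_ofList]
  apply pv_eq_of_pairwise_of_filter_eq key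
  · exact PySem.List.sorted_pairwise cells key
  · apply pv_pairwise_flatMap key ds _ (PySem.List.sorted_ofList_pairwise_lt _)
    intro d c hc
    simpa using (List.mem_filter.mp hc).2
  · intro d
    rw [pv_filter_sorted, List.filter_flatMap]
    have hcomp : (fun d' => (cells.filter (fun c => key c == d')).filter (fun c => key c == d))
        = fun d' => if d' == d then cells.filter (fun c => key c == d) else [] := by
      funext d'
      by_cases hdd : d' = d
      · subst hdd; simp
      · have : (d' == d) = false := by simp [hdd]
        rw [this]
        simp only [Bool.false_eq_true, if_false]
        apply List.filter_eq_nil_iff.mpr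
        intro c hc
        have := (List.mem_filter.mp hc).2
        simp only [beq_iff_eq] at this ⊢
        omega
    rw [hcomp, pv_flatMap_ite ds d (cells.filter (fun c => key c == d)) hnd]
    by_cases hin : d ∈ ds
    · simp [hin]
    · have : (cells.filter (fun c => key c == d)) = [] := by
        apply List.filter_eq_nil_iff.mpr
        intro c hc
        simp only [beq_iff_eq]
        intro h
        exact hin ((hmem d).mpr (h ▸ List.mem_map_of_mem hc))
      simp [hin, this]

-- A's grouping loop over (i, j) is the same dict fold over B's flat cell list.
theorem pv_hm_eq (R C r0 c0 : Int) :
    ((PySem.List.pyRange 0 R 1).foldl (fun hm i =>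
      (PySem.List.pyRange 0 C 1).foldl (fun hm j =>
        hm.modify (|i - r0| + |j - c0|) [] (fun v => v ++ [[i, j]])) hm)
      (PySem.Dict.empty : PySem.Dict Int (List (List Int))))
    = (pvCells R C).foldl (fun hm c => hm.modify (pvKey r0 c0 c) [] (fun v => v ++ [c]))
        PySem.Dict.empty := by
  unfold pvCells
  rw [List.foldl_flatMap]
  apply PySem.List.foldl_congr_mem
  intro acc i _
  rw [List.foldl_map]
  apply PySem.List.foldl_congr_mem
  intro acc' j _
  simp [pvKey, PySem.List.pyGetD]

-- A's whole computation is the bucket concatenation over sorted distinct distances.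
theorem pv_A_eq_buckets (R C r0 c0 : Int) :
    allCellsDistOrder R C r0 c0
      = (PySem.List.sorted (PySem.Set.ofList ((pvCells R C).map (pvKey r0 c0))) (fun k => k) false).flatMap
          (fun d => (pvCells R C).filter (fun c => pvKey r0 c0 c == d)) := by
  unfold allCellsDistOrder
  rw [pv_hm_eq R C r0 c0]
  set cells := pvCells R C with hcells
  set hm := cells.foldl (fun hm c => hm.modify (pvKey r0 c0 c) [] (fun v => v ++ [c]))
      (PySem.Dict.empty : PySem.Dict Int (List (List Int))) with hhm
  have hkeys : hm.keys = PySem.Set.ofList (cells.map (pvKey r0 c0)) := by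
    rw [hhm, PySem.Dict.keys_foldl_modify_key cells (pvKey r0 c0) [] (fun _ c => (fun v => v ++ [c]))]
    rfl
  have hget : ∀ d, hm.getD d [] = cells.filter (fun c => pvKey r0 c0 c == d) := by
    intro d
    have hstep : (cells.map (fun c => (pvKey r0 c0 c, c))).foldl
        (fun (hm : PySem.Dict Int (List (List Int))) p => hm.modify p.1 [] (fun v => v ++ [p.2]))
        PySem.Dict.empty
        = cells.foldl (fun hm c => hm.modify (pvKey r0 c0 c) [] (fun v => v ++ [c]))
            PySem.Dict.empty := by
      rw [List.foldl_map]
    rw [hhm, ← hstep, PySem.Dict.getD_foldl_modify_append]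
    simp [List.filter_map, Function.comp_def, List.map_map]
  rw [PySem.List.foldl_append_eq_flatMap]
  rw [hkeys]
  simp only [List.nil_append]
  congr 1
  funext d
  exact hget d

-- ===== VERDICT (by name: the statement is the Claim_ definition above) =====
theorem allCellsDistOrder_spec : Claim_equal_allCellsDistOrder := by
  intro R C r0 c0 _
  unfold Spec_allCellsDistOrder
  rw [pv_A_eq_buckets, ← pv_stable_sort_eq_buckets]
  rfl
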